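-- pv_equiv track=rewrite | github.com/amcc1996/advent-of-code-2024 | day20/main old.py | find_list_cheats
-- ===== SOURCE A (Python) =====
-- def find_list_cheats(maze):
--     cheats = set()
--     for i in range(1,len(maze)-1):
--         for j in range(1,len(maze[i])-2):
--             if (maze[i][j] == '#' and (maze[i][j-1] != '#' and maze[i][j+1] != '#')):
--                 cheats.add((i, j))
--
--     for i in range(1, len(maze)-2):
--         for j in range(len(maze[i])):
--             if (maze[i][j] == '#' and (maze[i-1][j] != '#' and maze[i+1][j] != '#')):
--                 cheats.add((i, j))
--
--     return cheats
-- ===== SOURCE B (Python) =====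
-- def find_list_cheats(maze):
--     # Per-row sets of wall columns; cheats found by set algebra instead of per-cell tests:
--     # a horizontal cheat column is a wall column with neither shifted copy of the wall set
--     # next to it, a vertical cheat column is a wall column absent from both neighbour rows.
--     wallcols = [{j for j, c in enumerate(row) if c == '#'} for row in maze]
--     cheats = []
--     for i in range(1, len(maze) - 1):
--         w = wallcols[i]
--         lone = w - {k - 1 for k in w} - {k + 1 for k in w}
--         cheats += [(i, j) for j in sorted(lone) if 1 <= j <= len(maze[i]) - 3]
--     for i in range(1, len(maze) - 2):
--         gap = wallcols[i] - wallcols[i - 1] - wallcols[i + 1]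
--         cheats += [(i, j) for j in sorted(gap)]
--     return set(cheats)
-- ===== Notes on version B (the rewrite author's own statement) =====
-- stated objective: alternative
-- what changed: B replaces all per-cell neighbour tests by set algebra on per-row wall-column sets: a row's horizontal cheats are its wall set minus its two shifted copies, its vertical cheats are its wall set minus the two neighbour rows' wall sets, each emitted via sorted(); Pre_ excludes exactly the ragged grids on which A's vertical pass raises IndexError.
import Mathlib
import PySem

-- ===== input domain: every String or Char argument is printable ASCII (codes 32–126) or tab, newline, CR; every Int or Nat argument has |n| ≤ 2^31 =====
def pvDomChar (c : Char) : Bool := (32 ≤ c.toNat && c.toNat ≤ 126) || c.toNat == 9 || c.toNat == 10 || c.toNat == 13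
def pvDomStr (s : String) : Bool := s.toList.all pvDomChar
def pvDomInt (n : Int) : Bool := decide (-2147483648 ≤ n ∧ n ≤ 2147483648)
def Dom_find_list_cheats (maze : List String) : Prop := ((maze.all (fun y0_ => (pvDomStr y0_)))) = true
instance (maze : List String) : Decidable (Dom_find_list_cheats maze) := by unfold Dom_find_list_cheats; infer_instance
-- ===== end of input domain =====

-- B finds each row's cheat columns by set algebra on per-row wall-column sets (differences with
-- shifted copies / neighbour rows) instead of A's per-cell neighbour tests; objective: alternative.

-- ===== PORT A =====
-- literal transliteration of A: two index-loop passes adding to a set; string indexing via pyGetD on .toList (always in range under Pre_)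
def find_list_cheats (maze : List String) : List (Int × Int) :=
  let n : Int := (maze.length : Int)
  let cheats1 : PySem.Set (Int × Int) :=
    (PySem.List.pyRange 1 (n - 1) 1).foldl (fun ch i =>
      let row := (PySem.List.pyGetD maze i "").toList
      (PySem.List.pyRange 1 ((row.length : Int) - 2) 1).foldl (fun ch j =>
        if PySem.List.pyGetD row j ' ' = '#' ∧ PySem.List.pyGetD row (j - 1) ' ' ≠ '#' ∧
            PySem.List.pyGetD row (j + 1) ' ' ≠ '#'
        then PySem.Set.add ch (i, j) else ch) ch) PySem.Set.empty
  (PySem.List.pyRange 1 (n - 2) 1).foldl (fun ch i =>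
    let row := (PySem.List.pyGetD maze i "").toList
    (PySem.List.pyRange 0 (row.length : Int) 1).foldl (fun ch j =>
      if PySem.List.pyGetD row j ' ' = '#' ∧
          PySem.List.pyGetD ((PySem.List.pyGetD maze (i - 1) "").toList) j ' ' ≠ '#' ∧
          PySem.List.pyGetD ((PySem.List.pyGetD maze (i + 1) "").toList) j ' ' ≠ '#'
      then PySem.Set.add ch (i, j) else ch) ch) cheats1

-- ===== PORT B =====
-- B-side helper: {j for j, c in enumerate(row) if c == '#'} — the set of wall columns of one row
def wallSet (row : List Char) : PySem.Set Int :=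
  PySem.Set.ofList (((PySem.List.enumerate row 0).filter (fun p => decide (p.2 = '#'))).map (fun p => p.1))

-- literal transliteration of Source B: per-row wall-column sets, then set differences
-- (with shifted copies horizontally, with the neighbour rows vertically), sorted per row
def find_list_cheats_alt (maze : List String) : List (Int × Int) :=
  let wallcols : List (PySem.Set Int) := maze.map (fun row => wallSet row.toList)
  let cheats1 : List (Int × Int) :=
    (PySem.List.pyRange 1 ((maze.length : Int) - 1) 1).foldl (fun acc i =>
      let w := PySem.List.pyGetD wallcols i PySem.Set.empty
      let lone := PySem.Set.diff (PySem.Set.diff w (PySem.Set.ofList (w.map (fun k => k - 1))))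
          (PySem.Set.ofList (w.map (fun k => k + 1)))
      acc ++ ((PySem.List.sorted lone (fun x => x) false).filter
          (fun j => decide (1 ≤ j ∧ j ≤ ((PySem.List.pyGetD maze i "").toList.length : Int) - 3))).map
          (fun j => (i, j))) []
  let cheats2 : List (Int × Int) :=
    (PySem.List.pyRange 1 ((maze.length : Int) - 2) 1).foldl (fun acc i =>
      let gap := PySem.Set.diff (PySem.Set.diff (PySem.List.pyGetD wallcols i PySem.Set.empty)
          (PySem.List.pyGetD wallcols (i - 1) PySem.Set.empty))
          (PySem.List.pyGetD wallcols (i + 1) PySem.Set.empty)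
      acc ++ (PySem.List.sorted gap (fun x => x) false).map (fun j => (i, j))) cheats1
  PySem.Set.ofList cheats2

-- ===== PRECONDITION & SPEC =====
-- Pre_ excludes exactly the ragged grids on which A's vertical pass raises IndexError
-- (a '#' in an inspected row i whose column j is missing from the examined neighbour row i-1,
-- or — when maze[i-1][j] != '#' — from row i+1); everywhere else A returns normally.
def Pre_find_list_cheats (maze : List String) : Prop :=
  ((List.range maze.length).all (fun i =>
    (List.range (maze.getD i "").toList.length).all (fun j =>
      decide (1 ≤ i → i + 2 < maze.length → (maze.getD i "").toList.getD j ' ' = '#' →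
        j < (maze.getD (i - 1) "").toList.length ∧
          ((maze.getD (i - 1) "").toList.getD j ' ' ≠ '#' →
            j < (maze.getD (i + 1) "").toList.length))))) = true
instance (maze : List String) : Decidable (Pre_find_list_cheats maze) := by
  unfold Pre_find_list_cheats; infer_instance
def pvWitness_find_list_cheats : List String := ["#####", "#.#.#", "##.##", "#.#.#", "#####"]
def Spec_find_list_cheats (maze : List String) (out : List (Int × Int)) : Prop := out = find_list_cheats_alt maze
instance (maze : List String) (out : List (Int × Int)) : Decidable (Spec_find_list_cheats maze out) := by unfold Spec_find_list_cheats; infer_instance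

-- ===== CLAIM (what is proved, stated in full; the proofs are below) =====
def Claim_equal_find_list_cheats : Prop := ∀ (maze : List String), Dom_find_list_cheats maze → Pre_find_list_cheats maze → Spec_find_list_cheats maze (find_list_cheats maze)

-- ===== LEMMAS AND PROOFS =====

-- two strictly increasing Int lists with the same members are equal
theorem eq_of_mem_iff_pairwise_lt {l1 l2 : List Int}
    (h1 : l1.Pairwise (· < ·)) (h2 : l2.Pairwise (· < ·))
    (hm : ∀ x, x ∈ l1 ↔ x ∈ l2) : l1 = l2 := by
  have n1 : l1.Nodup := h1.imp (fun h => ne_of_lt h)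
  have n2 : l2.Nodup := h2.imp (fun h => ne_of_lt h)
  have hp : l1.Perm l2 := (List.perm_ext_iff_of_nodup n1 n2).mpr hm
  exact PySem.List.eq_of_perm_of_pairwise_le_of_injective (fun x => x) (fun a b h => h) hp
    (h1.imp le_of_lt) (h2.imp le_of_lt)

-- range(a, b) is strictly increasing
theorem pairwise_pyRange_one (a b : Int) : (PySem.List.pyRange a b 1).Pairwise (· < ·) := by
  rw [List.pairwise_iff_getElem]
  intro i j hi hj hij
  rw [PySem.List.getElem_pyRange_one, PySem.List.getElem_pyRange_one]
  omega

-- the wall-column set of a row, as a filtered index range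
theorem wallSet_eq_filter (row : List Char) :
    wallSet row = (PySem.List.pyRange 0 (row.length : Int) 1).filter
      (fun j => decide (PySem.List.pyGetD row j ' ' = '#')) := by
  unfold wallSet
  rw [PySem.List.enumerate_eq_map_pyRange row ' ', List.filter_map, List.map_map]
  simp only [PySem.List.len_eq, Function.comp_def]
  rw [List.map_id_fun']
  exact PySem.Set.ofList_eq_self_of_nodup _
    (((pairwise_pyRange_one 0 (row.length : Int)).filter _).imp (fun h => ne_of_lt h))

theorem mem_wallSet {row : List Char} {j : Int} :
    j ∈ wallSet row ↔ 0 ≤ j ∧ j < (row.length : Int) ∧ PySem.List.pyGetD row j ' ' = '#' := by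
  rw [wallSet_eq_filter]
  simp [List.mem_filter, PySem.List.mem_pyRange_one, and_assoc]

-- sorted of a duplicate-free Int list is strictly increasing
theorem pairwise_sorted_of_nodup {l : List Int} (h : l.Nodup) :
    (PySem.List.sorted l (fun x => x) false).Pairwise (· < ·) := by
  have h1 := PySem.List.sorted_pairwise l (fun x => x)
  have h2 : (PySem.List.sorted l (fun x => x) false).Nodup := (PySem.List.sorted_perm l _ false).nodup_iff.mpr h
  exact (h1.and h2).imp (fun hab => lt_of_le_of_ne hab.1 hab.2)

-- per-row horizontal pass: A's filtered index scan = B's sorted set difference with shifted copies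
theorem row_horiz (row : List Char) :
    (PySem.List.pyRange 1 ((row.length : Int) - 2) 1).filter
      (fun j => decide (PySem.List.pyGetD row j ' ' = '#' ∧ PySem.List.pyGetD row (j - 1) ' ' ≠ '#' ∧
        PySem.List.pyGetD row (j + 1) ' ' ≠ '#')) =
    ((PySem.List.sorted (PySem.Set.diff (PySem.Set.diff (wallSet row)
        (PySem.Set.ofList ((wallSet row).map (fun k => k - 1))))
        (PySem.Set.ofList ((wallSet row).map (fun k => k + 1)))) (fun x => x) false).filter
      (fun j => decide (1 ≤ j ∧ j ≤ (row.length : Int) - 3))) := by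
  have hnd : (PySem.Set.diff (PySem.Set.diff (wallSet row)
      (PySem.Set.ofList ((wallSet row).map (fun k => k - 1))))
      (PySem.Set.ofList ((wallSet row).map (fun k => k + 1)))).Nodup :=
    PySem.Set.nodup_diff _ _ (PySem.Set.nodup_diff _ _ (PySem.Set.nodup_ofList _))
  apply eq_of_mem_iff_pairwise_lt
  · exact (pairwise_pyRange_one _ _).filter _
  · exact (pairwise_sorted_of_nodup hnd).filter _
  · intro x
    simp only [List.mem_filter, PySem.List.mem_pyRange_one, PySem.List.mem_sorted,
      PySem.Set.mem_diff, PySem.Set.mem_ofList, List.mem_map, mem_wallSet, decide_eq_true_eq]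
    constructor
    · rintro ⟨⟨hx1, hx2⟩, hw, hl, hr⟩
      refine ⟨⟨⟨⟨by omega, by omega, hw⟩, ?_⟩, ?_⟩, by omega, by omega⟩
      · rintro ⟨a, ⟨ha0, ha1, ha2⟩, rfl⟩
        exact hr (by rwa [show a - 1 + 1 = a by omega])
      · rintro ⟨a, ⟨ha0, ha1, ha2⟩, rfl⟩
        exact hl (by rwa [show a + 1 - 1 = a by omega])
    · rintro ⟨⟨⟨⟨hx0, hxlen, hw⟩, hno1⟩, hno2⟩, hb1, hb2⟩
      refine ⟨⟨by omega, by omega⟩, hw, ?_, ?_⟩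
      · intro hc
        exact hno2 ⟨x - 1, ⟨by omega, by omega, hc⟩, by omega⟩
      · intro hc
        exact hno1 ⟨x + 1, ⟨by omega, by omega, hc⟩, by omega⟩

-- per-row vertical pass, under the no-IndexError facts Pre_ provides for this row
theorem row_vert (row up down : List Char)
    (hpre : ∀ j : Nat, j < row.length → row.getD j ' ' = '#' →
      j < up.length ∧ (up.getD j ' ' ≠ '#' → j < down.length)) :
    (PySem.List.pyRange 0 ((row.length : Int)) 1).filter
      (fun j => decide (PySem.List.pyGetD row j ' ' = '#' ∧ PySem.List.pyGetD up j ' ' ≠ '#' ∧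
        PySem.List.pyGetD down j ' ' ≠ '#')) =
    PySem.List.sorted (PySem.Set.diff (PySem.Set.diff (wallSet row) (wallSet up)) (wallSet down))
      (fun x => x) false := by
  have hnd : ((PySem.Set.diff (PySem.Set.diff (wallSet row) (wallSet up)) (wallSet down))).Nodup :=
    PySem.Set.nodup_diff _ _ (PySem.Set.nodup_diff _ _ (PySem.Set.nodup_ofList _))
  apply eq_of_mem_iff_pairwise_lt
  · exact (pairwise_pyRange_one _ _).filter _
  · exact pairwise_sorted_of_nodup hnd
  · intro x
    simp only [List.mem_filter, PySem.List.mem_pyRange_one, PySem.List.mem_sorted,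
      PySem.Set.mem_diff, mem_wallSet, decide_eq_true_eq]
    constructor
    · rintro ⟨⟨hx0, hx1⟩, hw, hu, hd⟩
      refine ⟨⟨⟨hx0, hx1, hw⟩, ?_⟩, ?_⟩
      · rintro ⟨_, _, hc⟩; exact hu hc
      · rintro ⟨_, _, hc⟩; exact hd hc
    · rintro ⟨⟨⟨hx0, hx1, hw⟩, hnu⟩, hnd2⟩
      obtain ⟨k, rfl⟩ : ∃ k : Nat, (k : Int) = x := ⟨x.toNat, by omega⟩
      rw [PySem.List.pyGetD_natCast] at hw
      have hklen : k < row.length := by exact_mod_cast hx1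
      have h1 := hpre k hklen hw
      have hulen : (k : Int) < (up.length : Int) := by exact_mod_cast h1.1
      have hu : up.getD k ' ' ≠ '#' := by
        intro hc
        exact hnu ⟨by omega, hulen, by rwa [PySem.List.pyGetD_natCast]⟩
      have hdlen : (k : Int) < (down.length : Int) := by exact_mod_cast h1.2 hu
      refine ⟨⟨hx0, hx1⟩, by rwa [PySem.List.pyGetD_natCast], ?_, ?_⟩
      · rwa [PySem.List.pyGetD_natCast]
      · rw [PySem.List.pyGetD_natCast]
        intro hc
        exact hnd2 ⟨by omega, hdlen, by rwa [PySem.List.pyGetD_natCast]⟩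

-- a loop doing s.update(L(i)) over a list is one update by the concatenation
theorem foldl_update_eq_flatMap {α β : Type} [BEq α] (l : List β) (L : β → List α) (s : PySem.Set α) :
    l.foldl (fun s i => PySem.Set.update s (L i)) s = PySem.Set.update s (l.flatMap L) := by
  induction l generalizing s with
  | nil => simp [PySem.Set.update_nil]
  | cons b t ih => simp only [List.foldl_cons, List.flatMap_cons, PySem.Set.update_append, ih]

-- ===== VERDICT (by name: the statement is the Claim_ definition above) =====
theorem find_list_cheats_spec : Claim_equal_find_list_cheats := by
  intro maze _hD hpre
  unfold Spec_find_list_cheats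
  have hP : ∀ (k : Nat), 1 ≤ k → k + 2 < maze.length →
      ∀ j : Nat, j < (maze.getD k "").toList.length → (maze.getD k "").toList.getD j ' ' = '#' →
      j < (maze.getD (k - 1) "").toList.length ∧
        ((maze.getD (k - 1) "").toList.getD j ' ' ≠ '#' →
          j < (maze.getD (k + 1) "").toList.length) := by
    intro k hk1 hk2 j hj hwall
    unfold Pre_find_list_cheats at hpre
    simp only [List.all_eq_true, List.mem_range, decide_eq_true_eq] at hpre
    exact hpre k (by omega) j hj hk1 hk2 hwall
  show find_list_cheats maze = find_list_cheats_alt maze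
  unfold find_list_cheats find_list_cheats_alt
  simp only [PySem.List.foldl_ite_eq_foldl_filter, ← PySem.Set.update_map_eq_foldl_add,
    foldl_update_eq_flatMap, PySem.List.foldl_append_eq_flatMap, List.nil_append,
    PySem.Set.update_empty]
  rw [PySem.Set.ofList_append]
  congr 1
  · -- horizontal phase: per row, A's filtered index scan = B's sorted shifted-set difference
    congr 1
    simp only [List.flatMap_def]
    congr 1
    apply List.map_congr_left
    intro i hi
    rw [show (PySem.Set.empty : PySem.Set Int) = wallSet ("" : String).toList from rfl,
      PySem.List.pyGetD_map, row_horiz]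
  · -- vertical phase: per row, A's filtered index scan = B's sorted neighbour-row difference
    simp only [List.flatMap_def]
    congr 1
    apply List.map_congr_left
    intro i hi
    rw [PySem.List.mem_pyRange_one] at hi
    rw [show (PySem.Set.empty : PySem.Set Int) = wallSet ("" : String).toList from rfl,
      PySem.List.pyGetD_map, PySem.List.pyGetD_map, PySem.List.pyGetD_map]
    obtain ⟨k, rfl⟩ : ∃ k : Nat, (k : Int) = i := ⟨i.toNat, by omega⟩
    have e1 : (k : Int) - 1 = ((k - 1 : Nat) : Int) := by omega
    have e2 : (k : Int) + 1 = ((k + 1 : Nat) : Int) := by omega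
    rw [e1, e2, PySem.List.pyGetD_natCast, PySem.List.pyGetD_natCast, PySem.List.pyGetD_natCast]
    rw [← row_vert _ _ _ (hP k (by omega) (by omega))]
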